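-- pv_equiv track=rewrite | github.com/divotlt/fake-openclaw | script.py | _estimate_parallel_batches
-- ===== SOURCE A (Python) =====
-- from typing import Any, Dict, List, Optional, Tuple
--
-- def _estimate_parallel_batches(graph: Dict[str, List[str]]) -> int:
--     indegree: Dict[str, int] = {node: 0 for node in graph}
--     for _, children in graph.items():
--         for child in children:
--             indegree[child] = indegree.get(child, 0) + 1
--     ready = [node for node, deg in indegree.items() if deg == 0]
--     batches = 0
--     while ready:
--         batches += 1
--         next_ready: List[str] = []
--         for node in ready:
--             for child in graph.get(node, []):
--                 indegree[child] -= 1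
--                 if indegree[child] == 0:
--                     next_ready.append(child)
--         ready = next_ready
--     return batches
-- ===== SOURCE B (Python) =====
-- def _estimate_parallel_batches(graph):
--     # Reverse-adjacency fixpoint: grow the set of scheduled nodes level by level;
--     # a node becomes schedulable once all of its parents are scheduled.
--     parents = {}
--     for node in graph:
--         parents.setdefault(node, [])
--     for node, children in graph.items():
--         for child in children:
--             parents.setdefault(child, []).append(node)
--     done = set()
--     batches = 0
--     while True:
--         newly = [n for n in parents if n not in done and all(p in done for p in parents[n])]
--         if not newly:
--             return batches
--         done.update(newly)
--         batches += 1
-- ===== Notes on version B (the rewrite author's own statement) =====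
-- stated objective: alternative
-- what changed: Replaces Kahn's indegree-counting queue (build indegree map, repeatedly decrement children's counters and queue nodes that hit zero) by a reverse-adjacency fixpoint: build the parents map once, then grow the set of scheduled nodes level by level, each round scheduling every node all of whose parents are already scheduled; no counters are kept.
import Mathlib
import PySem

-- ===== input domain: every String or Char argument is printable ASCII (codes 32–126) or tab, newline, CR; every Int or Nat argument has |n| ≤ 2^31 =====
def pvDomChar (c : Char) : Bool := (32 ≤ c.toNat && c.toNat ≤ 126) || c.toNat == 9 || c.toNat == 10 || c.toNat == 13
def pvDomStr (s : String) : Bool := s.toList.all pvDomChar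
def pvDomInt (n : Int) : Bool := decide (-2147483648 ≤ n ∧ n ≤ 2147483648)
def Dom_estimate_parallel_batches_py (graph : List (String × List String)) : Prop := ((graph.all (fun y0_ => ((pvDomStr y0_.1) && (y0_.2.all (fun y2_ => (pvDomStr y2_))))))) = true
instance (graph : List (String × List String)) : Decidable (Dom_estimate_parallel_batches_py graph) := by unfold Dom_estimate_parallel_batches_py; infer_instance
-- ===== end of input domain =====

-- B replaces A's Kahn indegree-decrement queue by a reverse-adjacency fixpoint that grows the
-- set of scheduled nodes level by level; alternative decomposition, same return value.


-- ===== PORT A =====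
-- body of A's inner loop: 'indegree[child] -= 1; if indegree[child] == 0: next_ready.append(child)'
def pvAStep (st : PySem.Dict String Int × List String) (c : String) :
    PySem.Dict String Int × List String :=
  let d := st.1.insert c (st.1.getD c 0 - 1)
  if d.getD c 0 == 0 then (d, st.2 ++ [c]) else (d, st.2)

-- 'while ready:' — fuel only makes the loop total; the fuel passed below bounds the round count
def pvALoop (g : PySem.Dict String (List String)) :
    Nat → List String → PySem.Dict String Int → Int → Int
  | 0, _, _, batches => batches
  | fuel + 1, ready, indeg, batches =>
    if ready.isEmpty then batches
    else
      let st := ready.foldl (fun st node => (g.getD node []).foldl pvAStep st) (indeg, [])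
      pvALoop g fuel st.2 st.1 (batches + 1)

def estimate_parallel_batches_py (graph : List (String × List String)) : Int :=
  let g : PySem.Dict String (List String) := PySem.Dict.mk graph
  let indeg0 : PySem.Dict String Int := graph.foldl (fun d p => d.insert p.1 0) PySem.Dict.empty
  let indeg := graph.foldl (fun d p => p.2.foldl (fun d c => d.insert c (d.getD c 0 + 1)) d) indeg0
  let ready := (indeg.items.filter (fun p => p.2 == 0)).map (fun p => p.1)
  pvALoop g (graph.length + (graph.map (fun p => p.2.length)).sum + 1) ready indeg 0

-- ===== PORT B =====
-- 'while True:' — fuel only makes the loop total; the fuel passed below bounds the round count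
def pvBLoop (parents : PySem.Dict String (List String)) :
    Nat → PySem.Set String → Int → Int
  | 0, _, batches => batches
  | fuel + 1, done, batches =>
    let newly := parents.keys.filter
      (fun n => !PySem.Set.contains done n && (parents.getD n []).all (fun p => PySem.Set.contains done p))
    if newly.isEmpty then batches
    else pvBLoop parents fuel (PySem.Set.update done newly) (batches + 1)

def estimate_parallel_batches_py_alt (graph : List (String × List String)) : Int :=
  let p0 : PySem.Dict String (List String) :=
    graph.foldl (fun d p => d.setdefault p.1 []) PySem.Dict.empty
  let parents := graph.foldl
    (fun (d : PySem.Dict String (List String)) p =>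
      p.2.foldl (fun d c => d.modify c [] (fun l => l ++ [p.1])) d) p0
  pvBLoop parents (graph.length + (graph.map (fun p => p.2.length)).sum + 1) PySem.Set.empty 0

-- ===== PRECONDITION & SPEC =====
-- Pre_ excludes association lists with a duplicated key: such a list represents no Python dict
-- (a dict cannot hold two entries with the same key), so A's Python never receives it.
def Pre_estimate_parallel_batches_py (graph : List (String × List String)) : Prop :=
  (graph.map Prod.fst).Nodup
instance (graph : List (String × List String)) : Decidable (Pre_estimate_parallel_batches_py graph) := by unfold Pre_estimate_parallel_batches_py; infer_instance

def pvWitness_estimate_parallel_batches_py : (List (String × List String)) :=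
  [("a", ["b"]), ("b", [])]

def Spec_estimate_parallel_batches_py (graph : List (String × List String)) (out : Int) : Prop := out = estimate_parallel_batches_py_alt graph
instance (graph : List (String × List String)) (out : Int) : Decidable (Spec_estimate_parallel_batches_py graph out) := by unfold Spec_estimate_parallel_batches_py; infer_instance

-- ===== CLAIM (what is proved, stated in full; the proofs are below) =====
def Claim_equal_estimate_parallel_batches_py : Prop := ∀ (graph : List (String × List String)), Dom_estimate_parallel_batches_py graph → Pre_estimate_parallel_batches_py graph → Spec_estimate_parallel_batches_py graph (estimate_parallel_batches_py graph)

-- ===== LEMMAS AND PROOFS =====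

-- edge list (child, parent) with multiplicity, in scan order
def pvEdges (graph : List (String × List String)) : List (String × String) :=
  graph.flatMap (fun p => p.2.map (fun c => (c, p.1)))

-- parents of x, with multiplicity
def pvPar (graph : List (String × List String)) (x : String) : List String :=
  (((pvEdges graph).filter (fun q => q.1 == x)).map (fun q => q.2))

def pvAllCh (graph : List (String × List String)) : List String :=
  graph.flatMap (fun p => p.2)

-- the node universe, in the order both dicts list their keys
def pvU (graph : List (String × List String)) : List String :=
  PySem.Set.update (PySem.Set.ofList (graph.map Prod.fst)) (pvAllCh graph)

-- remaining indegree of x once the nodes of `done` have been processed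
def pvR (graph : List (String × List String)) (done : List String) (x : String) : Int :=
  ((pvPar graph x).length : Int) - ((pvPar graph x).countP (fun p => decide (p ∈ done)) : Int)

-- a nested loop over a list of lists is one loop over the flattened list
theorem pv_foldl_nested {α β σ : Type} (l : List α) (h : α → List β) (f : σ → β → σ) (init : σ) :
    l.foldl (fun s a => (h a).foldl f s) init = (l.flatMap h).foldl f init := by
  induction l generalizing init with
  | nil => rfl
  | cons a t ih => simp [List.flatMap_cons, List.foldl_append, ih]

theorem pv_indeg0_getD_aux (l : List (String × List String)) (d : PySem.Dict String Int)
    (hd : ∀ k, d.getD k 0 = 0) (c : String) :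
    (l.foldl (fun (d : PySem.Dict String Int) p => d.insert p.1 0) d).getD c 0 = 0 := by
  induction l generalizing d with
  | nil => exact hd c
  | cons a t ih =>
      refine ih _ (fun k => ?_)
      rw [PySem.Dict.getD_insert]
      split <;> simp [hd]

theorem pv_indeg0_getD (graph : List (String × List String)) (c : String) :
    (graph.foldl (fun (d : PySem.Dict String Int) p => d.insert p.1 0) PySem.Dict.empty).getD c 0 = 0 :=
  pv_indeg0_getD_aux graph _ (fun k => PySem.Dict.getD_empty k 0) c

theorem pv_indeg_getD (graph : List (String × List String)) (c : String) :
    (graph.foldl (fun (d : PySem.Dict String Int) p => p.2.foldl (fun d c => d.insert c (d.getD c 0 + 1)) d)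
      (graph.foldl (fun (d : PySem.Dict String Int) p => d.insert p.1 0) PySem.Dict.empty)).getD c 0
      = ((pvAllCh graph).count c : Int) := by
  rw [pv_foldl_nested graph (fun p => p.2) (fun (d : PySem.Dict String Int) c => d.insert c (d.getD c 0 + 1))]
  rw [PySem.Dict.getD_foldl_insert_add_one, pv_indeg0_getD]
  simp [pvAllCh]

theorem pv_indeg_keys (graph : List (String × List String)) :
    (graph.foldl (fun (d : PySem.Dict String Int) p => p.2.foldl (fun d c => d.insert c (d.getD c 0 + 1)) d)
      (graph.foldl (fun (d : PySem.Dict String Int) p => d.insert p.1 0) PySem.Dict.empty)).keys = pvU graph := by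
  rw [pv_foldl_nested graph (fun p => p.2) (fun (d : PySem.Dict String Int) c => d.insert c (d.getD c 0 + 1))]
  rw [PySem.Dict.keys_foldl_insert]
  rw [show (fun (d : PySem.Dict String Int) (p : String × List String) => d.insert p.1 0)
      = (fun d p => d.insert p.1 ((fun (_ : PySem.Dict String Int) (_ : String × List String) => (0:Int)) d p)) from rfl]
  rw [PySem.Dict.keys_foldl_insert_key]
  simp [pvU, pvAllCh, PySem.Dict.keys_empty, PySem.Set.ofList_eq_foldl, PySem.Set.update]

-- nested modify fold = fold over the (child, parent) edge list
theorem pv_parents_eq (graph : List (String × List String)) (d : PySem.Dict String (List String)) :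
    graph.foldl (fun (d : PySem.Dict String (List String)) p =>
        p.2.foldl (fun d c => d.modify c [] (fun l => l ++ [p.1])) d) d
      = (pvEdges graph).foldl (fun d q => d.modify q.1 [] (fun l => l ++ [q.2])) d := by
  simp only [pvEdges]
  rw [← pv_foldl_nested graph (fun p => p.2.map (fun c => (c, p.1)))
      (fun (d : PySem.Dict String (List String)) q => d.modify q.1 [] (fun l => l ++ [q.2]))]
  refine PySem.List.foldl_congr_mem _ _ _ _ (fun d p _ => ?_)
  rw [List.foldl_map]

theorem pv_p0_getD (graph : List (String × List String)) (n : String) :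
    (graph.foldl (fun (d : PySem.Dict String (List String)) p => d.setdefault p.1 []) PySem.Dict.empty).getD n [] = [] := by
  suffices h : ∀ (l : List (String × List String)) (d : PySem.Dict String (List String)),
      (∀ k, d.getD k [] = []) →
      (l.foldl (fun d p => d.setdefault p.1 []) d).getD n [] = [] by
    exact h graph _ (fun k => PySem.Dict.getD_empty k [])
  intro l
  induction l with
  | nil => intro d hd; exact hd n
  | cons a t ih =>
      intro d hd
      refine ih _ (fun k => ?_)
      by_cases hk : k = a.1
      · subst hk; rw [PySem.Dict.getD_setdefault_self]; exact hd _
      · rw [PySem.Dict.getD_eq_get?_getD, PySem.Dict.get?_setdefault_of_ne _ _ hk,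
          ← PySem.Dict.getD_eq_get?_getD]
        exact hd k

theorem pv_p0_keys (graph : List (String × List String)) :
    (graph.foldl (fun (d : PySem.Dict String (List String)) p => d.setdefault p.1 []) PySem.Dict.empty).keys
      = PySem.Set.ofList (graph.map Prod.fst) := by
  suffices h : ∀ (l : List (String × List String)) (d : PySem.Dict String (List String)),
      (l.foldl (fun d p => d.setdefault p.1 []) d).keys = PySem.Set.update d.keys (l.map Prod.fst) by
    rw [h, PySem.Dict.keys_empty, PySem.Set.ofList_eq_foldl]; rfl
  intro l
  induction l with
  | nil => intro d; rfl
  | cons a t ih =>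
      intro d
      rw [List.foldl_cons, ih, List.map_cons]
      have h1 : (d.setdefault a.1 ([] : List String)).keys = PySem.Set.add d.keys a.1 := by
        rw [PySem.Dict.keys_setdefault, PySem.Set.add]
        rw [PySem.Dict.contains_eq_decide_mem_keys]
        rcases h : PySem.Set.contains d.keys a.1 with _ | _
        · simp [PySem.Set.contains] at h; simp [h]
        · simp [PySem.Set.contains] at h; simp [h]
      rw [h1]
      rfl

theorem pv_nodup_U (graph : List (String × List String)) : (pvU graph).Nodup :=
  PySem.Set.nodup_update _ _ (PySem.Set.nodup_ofList _)

theorem pv_edges_map_fst (graph : List (String × List String)) :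
    (pvEdges graph).map Prod.fst = pvAllCh graph := by
  simp [pvEdges, pvAllCh, List.map_flatMap, Function.comp_def]

theorem pv_par_length (graph : List (String × List String)) (x : String) :
    (pvPar graph x).length = (pvAllCh graph).count x := by
  rw [← pv_edges_map_fst, pvPar, List.length_map, List.count_eq_countP, List.countP_map,
    List.countP_eq_length_filter]
  simp [Function.comp_def]

theorem pv_mem_U_of_par (graph : List (String × List String)) (x : String)
    (h : pvPar graph x ≠ []) : x ∈ pvU graph := by
  rw [pvU, PySem.Set.mem_update]
  right
  rw [← pv_edges_map_fst]
  rcases List.exists_mem_of_ne_nil _ h with ⟨p, hp⟩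
  rw [pvPar] at hp
  rcases List.mem_map.1 hp with ⟨q, hq, rfl⟩
  have := List.mem_filter.1 hq
  have hx : q.1 = x := by simpa using this.2
  exact hx ▸ List.mem_map_of_mem this.1

theorem pv_par_sub (graph : List (String × List String)) (x p : String)
    (h : p ∈ pvPar graph x) : p ∈ graph.map Prod.fst := by
  rw [pvPar] at h
  rcases List.mem_map.1 h with ⟨q, hq, rfl⟩
  have hq1 := (List.mem_filter.1 hq).1
  rw [pvEdges] at hq1
  rcases List.mem_flatMap.1 hq1 with ⟨a, ha, hqa⟩
  rcases List.mem_map.1 hqa with ⟨c, _, rfl⟩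
  exact List.mem_map_of_mem ha

theorem pv_adj (graph : List (String × List String)) (hnd : (graph.map Prod.fst).Nodup)
    (n x : String) :
    ((PySem.Dict.mk graph).getD n []).count x = (pvPar graph x).count n := by
  induction graph with
  | nil => simp [pvPar, pvEdges, PySem.Dict.getD_eq_get?_getD]; rfl
  | cons a t ih =>
      rcases a with ⟨k, cs⟩
      simp only [List.map_cons, List.nodup_cons] at hnd
      have hpar : pvPar ((k, cs) :: t) x
          = (cs.filter (fun c => c == x)).map (fun _ => k) ++ pvPar t x := by
        simp [pvPar, pvEdges, List.flatMap_cons, List.filter_append, List.filter_map,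
          List.map_append, List.map_map, Function.comp_def]
      rw [hpar, List.count_append]
      rw [PySem.Dict.getD_eq_get?_getD]
      rw [PySem.Dict.get?_mk_cons]
      by_cases hk : k = n
      · subst hk
        simp only [BEq.rfl]
        have h0 : (pvPar t x).count k = 0 := by
          rw [List.count_eq_zero]
          intro hmem
          exact hnd.1 (pv_par_sub t x k hmem)
        rw [h0, Nat.add_zero, List.count_eq_countP, List.count_eq_countP, List.countP_map]
        simp [Function.comp_def, List.countP_eq_length_filter]
      · rw [if_neg (by simpa using hk)]
        rw [← PySem.Dict.getD_eq_get?_getD, ih hnd.2]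
        have : ((cs.filter (fun c => c == x)).map (fun _ => k)).count n = 0 := by
          rw [List.count_eq_zero]
          intro hmem
          rcases List.mem_map.1 hmem with ⟨c, _, rfl⟩
          exact hk rfl
        omega

theorem pv_countP_cons {L : List String} {r : String} {rest : List String} (h : r ∉ rest) :
    L.countP (fun p => decide (p ∈ r :: rest)) =
      L.count r + L.countP (fun p => decide (p ∈ rest)) := by
  induction L with
  | nil => simp
  | cons a t ih =>
      rw [List.countP_cons, List.count_cons, List.countP_cons, ih]
      by_cases ha : a = r
      · subst ha
        simp [h]
        omega
      · by_cases hm : a ∈ rest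
        · simp [ha, hm]
          omega
        · simp [ha, hm]

theorem pv_countP_or_disjoint (L : List String) (P Q : String → Prop)
    [DecidablePred P] [DecidablePred Q] (h : ∀ x, ¬ (P x ∧ Q x)) :
    L.countP (fun p => decide (P p ∨ Q p)) =
      L.countP (fun p => decide (P p)) + L.countP (fun p => decide (Q p)) := by
  induction L with
  | nil => simp
  | cons a t ih =>
      rw [List.countP_cons, List.countP_cons, List.countP_cons, ih]
      by_cases hp : P a <;> by_cases hq : Q a
      · exact absurd ⟨hp, hq⟩ (h a)
      · simp [hp, hq]; omega
      · simp [hp, hq]; omega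
      · simp [hp, hq]

theorem pv_round (ws : List String) (d : PySem.Dict String Int) (acc : List String) :
    (∀ x, (ws.foldl pvAStep (d, acc)).1.getD x 0 = d.getD x 0 - (ws.count x : Int)) ∧
    (∀ x, x ∈ (ws.foldl pvAStep (d, acc)).2 ↔
        x ∈ acc ∨ (1 ≤ d.getD x 0 ∧ d.getD x 0 ≤ (ws.count x : Int))) ∧
    (acc.Nodup → (∀ x ∈ acc, d.getD x 0 ≤ 0) →
      (ws.foldl pvAStep (d, acc)).2.Nodup ∧
        ∀ x ∈ (ws.foldl pvAStep (d, acc)).2, (ws.foldl pvAStep (d, acc)).1.getD x 0 ≤ 0) := by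
  induction ws generalizing d acc with
  | nil =>
      refine ⟨fun x => by simp, fun x => by simp; intro h1 h2; omega, fun h1 h2 => ⟨h1, h2⟩⟩
  | cons w t ih =>
      have hstep : pvAStep (d, acc) w =
          (d.insert w (d.getD w 0 - 1),
            if d.getD w 0 - 1 = 0 then acc ++ [w] else acc) := by
        rw [pvAStep]
        by_cases h : d.getD w 0 - 1 = 0
        · simp [h]
        · simp [h]
      rw [List.foldl_cons, hstep]
      set d1 := d.insert w (d.getD w 0 - 1) with hd1
      set acc1 := if d.getD w 0 - 1 = 0 then acc ++ [w] else acc with hacc1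
      obtain ⟨iha, ihb, ihc⟩ := ih d1 acc1
      have hd1x : ∀ x, d1.getD x 0 = if x = w then d.getD w 0 - 1 else d.getD x 0 := by
        intro x; rw [hd1, PySem.Dict.getD_insert]
      refine ⟨?_, ?_, ?_⟩
      · intro x
        rw [iha x, hd1x x]
        by_cases hx : x = w
        · subst hx; simp; omega
        · simp [hx, Ne.symm hx]
      · intro x
        rw [ihb x]
        have hmem : x ∈ acc1 ↔ x ∈ acc ∨ (x = w ∧ d.getD w 0 = 1) := by
          rw [hacc1]
          by_cases h : d.getD w 0 - 1 = 0
          · have hv : d.getD w 0 = 1 := by omega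
            simp [hv]
          · have hv : d.getD w 0 ≠ 1 := by omega
            simp [h, hv]
        rw [hmem, hd1x x]
        by_cases hx : x = w
        · subst hx
          have hc : (x :: t).count x = t.count x + 1 := by simp
          rw [if_pos rfl, hc]
          push_cast
          constructor
          · rintro ((h | ⟨-, h1⟩) | ⟨h1, h2⟩)
            · exact Or.inl h
            · exact Or.inr (by omega)
            · exact Or.inr (by omega)
          · rintro (h | ⟨h1, h2⟩)
            · exact Or.inl (Or.inl h)
            · by_cases he : d.getD x 0 = 1
              · exact Or.inl (Or.inr ⟨rfl, he⟩)
              · exact Or.inr (by omega)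
        · have hc : (w :: t).count x = t.count x := by simp [Ne.symm hx]
          rw [if_neg hx, hc]
          simp [hx]
      · intro hnd hle
        refine ihc ?_ ?_
        · rw [hacc1]
          by_cases h : d.getD w 0 - 1 = 0
          · rw [if_pos h]
            refine List.Nodup.append hnd (List.nodup_singleton w) ?_
            intro x hx hxw
            rcases List.mem_singleton.1 hxw with rfl
            have := hle x hx; omega
          · rw [if_neg h]; exact hnd
        · intro x hx
          rw [hd1x x]
          by_cases hxw : x = w
          · subst hxw
            rw [if_pos rfl]
            rw [hacc1] at hx
            by_cases h : d.getD x 0 - 1 = 0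
            · omega
            · rw [if_neg h] at hx
              have := hle x hx; omega
          · rw [if_neg hxw]
            rw [hacc1] at hx
            by_cases h : d.getD w 0 - 1 = 0
            · rw [if_pos h] at hx
              rcases List.mem_append.1 hx with hx | hx
              · exact hle x hx
              · exact absurd (List.mem_singleton.1 hx) hxw
            · rw [if_neg h] at hx
              exact hle x hx

theorem pv_count_flat (graph : List (String × List String)) (hnd : (graph.map Prod.fst).Nodup)
    (ready : List String) (hr : ready.Nodup) (x : String) :
    (ready.flatMap (fun n => (PySem.Dict.mk graph).getD n [])).count x
      = (pvPar graph x).countP (fun p => decide (p ∈ ready)) := by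
  induction ready with
  | nil => simp
  | cons r rest ih =>
      rw [List.nodup_cons] at hr
      rw [List.flatMap_cons, List.count_append, ih hr.2, pv_adj graph hnd r x,
        pv_countP_cons hr.1]

theorem pv_loop (graph : List (String × List String)) (hnd : (graph.map Prod.fst).Nodup)
    (parents : PySem.Dict String (List String))
    (hpk : parents.keys = pvU graph) (hpg : ∀ n, parents.getD n [] = pvPar graph n) :
    ∀ (fuel : Nat) (ready : List String) (indeg : PySem.Dict String Int)
      (done : PySem.Set String) (batches : Int),
      (∀ n ∈ done, ∀ p ∈ pvPar graph n, p ∈ done) →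
      (∀ x, indeg.getD x 0 = pvR graph done x) →
      ready.Nodup →
      (∀ x, x ∈ ready ↔ x ∈ pvU graph ∧ x ∉ done ∧ ∀ p ∈ pvPar graph x, p ∈ done) →
      pvALoop (PySem.Dict.mk graph) fuel ready indeg batches = pvBLoop parents fuel done batches := by
  intro fuel
  induction fuel with
  | zero => intro ready indeg done batches _ _ _ _; rfl
  | succ fuel ih =>
      intro ready indeg done batches hclosed hindeg hrn hrc
      have hnew : ∀ x, (x ∈ parents.keys.filter
          (fun n => !PySem.Set.contains done n &&
            (parents.getD n []).all (fun p => PySem.Set.contains done p))) ↔ x ∈ ready := by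
        intro x
        rw [List.mem_filter, hpk, hrc x]
        simp [hpg, List.all_eq_true]
      set newly := parents.keys.filter
          (fun n => !PySem.Set.contains done n &&
            (parents.getD n []).all (fun p => PySem.Set.contains done p)) with hnewly
      by_cases hre : ready = []
      · subst hre
        have : newly = [] := by
          rw [List.eq_nil_iff_forall_not_mem]
          intro x hx
          exact absurd ((hnew x).1 hx) (List.not_mem_nil)
        rw [pvALoop, pvBLoop, ← hnewly, this]
        simp
      · have hnn : newly ≠ [] := by
          intro hnil
          rcases List.exists_mem_of_ne_nil _ hre with ⟨x, hx⟩
          rw [← hnew x, hnil] at hx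
          exact List.not_mem_nil hx
        rw [pvALoop, pvBLoop, ← hnewly]
        rw [if_neg (by simpa [List.isEmpty_iff] using hre),
            if_neg (by simpa [List.isEmpty_iff] using hnn)]
        rw [pv_foldl_nested ready (fun n => (PySem.Dict.mk graph).getD n []) pvAStep (indeg, [])]
        set ws := ready.flatMap (fun n => (PySem.Dict.mk graph).getD n []) with hws
        obtain ⟨ra, rb, rc⟩ := pv_round ws indeg []
        obtain ⟨rnodup, -⟩ := rc (List.nodup_nil) (by intro x hx; exact absurd hx (List.not_mem_nil))
        set done' := PySem.Set.update done newly with hdone'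
        have hmemd : ∀ x, x ∈ done' ↔ x ∈ done ∨ x ∈ ready := by
          intro x
          rw [hdone', PySem.Set.mem_update, hnew x]
        have hdisj : ∀ p, ¬ (p ∈ done ∧ p ∈ ready) := by
          rintro p ⟨hp1, hp2⟩
          exact ((hrc p).1 hp2).2.1 hp1
        have hsum : ∀ x, (pvPar graph x).countP (fun p => decide (p ∈ done'))
            = (pvPar graph x).countP (fun p => decide (p ∈ done))
              + (pvPar graph x).countP (fun p => decide (p ∈ ready)) := by
          intro x
          rw [← pv_countP_or_disjoint _ _ _ hdisj]
          refine List.countP_congr (fun a _ => ?_)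
          simp [hmemd a]
        have hcount : ∀ x, ws.count x = (pvPar graph x).countP (fun p => decide (p ∈ ready)) :=
          fun x => pv_count_flat graph hnd ready hrn x
        -- new indegree invariant
        have hindeg' : ∀ x, (ws.foldl pvAStep (indeg, [])).1.getD x 0 = pvR graph done' x := by
          intro x
          rw [ra x, hindeg x, hcount x, pvR, pvR, hsum x]
          push_cast
          ring
        -- closure of done'
        have hclosed' : ∀ n ∈ done', ∀ p ∈ pvPar graph n, p ∈ done' := by
          intro n hn p hp
          rcases (hmemd n).1 hn with hn | hn
          · exact (hmemd p).2 (Or.inl (hclosed n hn p hp))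
          · exact (hmemd p).2 (Or.inl (((hrc n).1 hn).2.2 p hp))
        -- characterisation of the next ready list
        have hrc' : ∀ x, x ∈ (ws.foldl pvAStep (indeg, [])).2 ↔
            x ∈ pvU graph ∧ x ∉ done' ∧ ∀ p ∈ pvPar graph x, p ∈ done' := by
          intro x
          rw [rb x, hindeg x, hcount x]
          have ha_le := List.countP_le_length (l := pvPar graph x) (p := fun p => decide (p ∈ done))
          have hb_le := List.countP_le_length (l := pvPar graph x) (p := fun p => decide (p ∈ ready))
          have hd_le := List.countP_le_length (l := pvPar graph x) (p := fun p => decide (p ∈ done'))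
          have hiffdone : ((pvPar graph x).countP (fun p => decide (p ∈ done)) = (pvPar graph x).length)
              ↔ ∀ p ∈ pvPar graph x, p ∈ done := by
            rw [List.countP_eq_length]; simp
          have hiffdone' : ((pvPar graph x).countP (fun p => decide (p ∈ done')) = (pvPar graph x).length)
              ↔ ∀ p ∈ pvPar graph x, p ∈ done' := by
            rw [List.countP_eq_length]; simp
          rw [pvR]
          constructor
          · rintro (h | ⟨h1, h2⟩)
            · exact absurd h (List.not_mem_nil)
            · have halt : (pvPar graph x).countP (fun p => decide (p ∈ done))
                  < (pvPar graph x).length := by omega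
              have hsub' : ∀ p ∈ pvPar graph x, p ∈ done' := by
                rw [← hiffdone']
                rw [hsum x] at hd_le ⊢
                omega
              refine ⟨?_, ?_, hsub'⟩
              · refine pv_mem_U_of_par graph x ?_
                intro hnil
                rw [hnil] at halt
                simp at halt
              · intro hx
                rcases (hmemd x).1 hx with hx | hx
                · exact absurd (hiffdone.2 (hclosed x hx)) (by omega)
                · exact absurd (hiffdone.2 (((hrc x).1 hx).2.2)) (by omega)
          · rintro ⟨hU, hnd', hsub'⟩
            right
            have heq' : (pvPar graph x).countP (fun p => decide (p ∈ done'))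
                = (pvPar graph x).length := hiffdone'.2 hsub'
            rw [hsum x] at heq'
            have halt : (pvPar graph x).countP (fun p => decide (p ∈ done))
                < (pvPar graph x).length := by
              rcases Nat.lt_or_ge ((pvPar graph x).countP (fun p => decide (p ∈ done)))
                (pvPar graph x).length with h | h
              · exact h
              · exfalso
                have hall : ∀ p ∈ pvPar graph x, p ∈ done := hiffdone.1 (by omega)
                have hxready : x ∈ ready := (hrc x).2 ⟨hU, fun hx => hnd' ((hmemd x).2 (Or.inl hx)), hall⟩
                exact hnd' ((hmemd x).2 (Or.inr hxready))
            omega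
        rw [ih _ _ done' (batches + 1) hclosed' hindeg' rnodup hrc']

theorem pv_parents_getD (graph : List (String × List String)) (n : String) :
    (graph.foldl (fun (d : PySem.Dict String (List String)) p =>
        p.2.foldl (fun d c => d.modify c [] (fun l => l ++ [p.1])) d)
      (graph.foldl (fun (d : PySem.Dict String (List String)) p => d.setdefault p.1 []) PySem.Dict.empty)).getD n []
    = pvPar graph n := by
  rw [pv_parents_eq, PySem.Dict.getD_foldl_modify_append, pv_p0_getD]
  simp [pvPar]

theorem pv_parents_keys (graph : List (String × List String)) :
    (graph.foldl (fun (d : PySem.Dict String (List String)) p =>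
        p.2.foldl (fun d c => d.modify c [] (fun l => l ++ [p.1])) d)
      (graph.foldl (fun (d : PySem.Dict String (List String)) p => d.setdefault p.1 []) PySem.Dict.empty)).keys
    = pvU graph := by
  rw [pv_parents_eq,
    PySem.Dict.keys_foldl_modify_key (pvEdges graph) Prod.fst [] (fun d q l => l ++ [q.2]),
    pv_p0_keys, pv_edges_map_fst]
  rfl

-- ===== VERDICT (by name: the statement is the Claim_ definition above) =====
theorem estimate_parallel_batches_py_spec : Claim_equal_estimate_parallel_batches_py := by
  unfold Claim_equal_estimate_parallel_batches_py
  intro graph _ hpre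
  unfold Pre_estimate_parallel_batches_py at hpre
  unfold Spec_estimate_parallel_batches_py
  simp only [estimate_parallel_batches_py, estimate_parallel_batches_py_alt]
  have hUnodup := pv_nodup_U graph
  have hkeys := pv_indeg_keys graph
  have hgetD := pv_indeg_getD graph
  set indeg := graph.foldl (fun d p => p.2.foldl (fun d c => d.insert c (d.getD c 0 + 1)) d)
      (graph.foldl (fun (d : PySem.Dict String Int) p => d.insert p.1 0) PySem.Dict.empty) with hindeg
  have hready_eq : ((indeg.items.filter (fun p => p.2 == 0)).map (fun p => p.1))
      = (pvU graph).filter (fun k => indeg.getD k 0 == 0) := by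
    rw [PySem.Dict.items_eq_map_keys indeg (by rw [hkeys]; exact hUnodup) 0, hkeys,
      List.filter_map, List.map_map]
    simp [Function.comp_def]
  rw [hready_eq]
  refine pv_loop graph hpre _ (pv_parents_keys graph) (pv_parents_getD graph)
    _ _ indeg PySem.Set.empty 0 ?_ ?_ ?_ ?_
  · intro n hn
    simp [PySem.Set.empty] at hn
  · intro x
    rw [hgetD x, pvR]
    have hlen := pv_par_length graph x
    have hcp : (pvPar graph x).countP (fun p => decide (p ∈ (PySem.Set.empty : PySem.Set String))) = 0 := by
      simp [PySem.Set.empty]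
    rw [hcp]
    push_cast
    omega
  · exact hUnodup.filter _
  · intro x
    have hlen := pv_par_length graph x
    rw [List.mem_filter]
    constructor
    · rintro ⟨h1, h2⟩
      refine ⟨h1, by simp [PySem.Set.empty], ?_⟩
      intro p hp
      exfalso
      have hc : (pvAllCh graph).count x = 0 := by
        rw [hgetD x] at h2
        simpa using h2
      rw [← hlen, List.length_eq_zero_iff] at hc
      rw [hc] at hp
      exact List.not_mem_nil hp
    · rintro ⟨h1, -, h3⟩
      refine ⟨h1, ?_⟩
      have hnil : pvPar graph x = [] := by
        rw [List.eq_nil_iff_forall_not_mem]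
        intro p hp
        have := h3 p hp
        simp [PySem.Set.empty] at this
      have hc : (pvAllCh graph).count x = 0 := by
        rw [← hlen, hnil]
        rfl
      rw [hgetD x, hc]
      simp
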